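-- pv_equiv track=rewrite | github.com/wndlthsk/algorithm-study | week49/이재훈/중요한단어를스포방지_이재훈.py | solution
-- ===== SOURCE A (Python) =====
-- def solution(message, spoiler_ranges):
--     n = len(message)
--
--     # 1. 단어 파싱 (start, end, word)
--     words = []
--     i = 0
--     while i < n:
--         if message[i] == ' ':
--             i += 1
--             continue
--         j = i
--         while j < n and message[j] != ' ':
--             j += 1
--         words.append((i, j - 1, message[i:j]))
--         i = j
--
--     # 2. 각 문자 reveal 시점
--     reveal_time = [0] * n
--     for t, (s, e) in enumerate(spoiler_ranges, start=1):
--         for i in range(s, e + 1):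
--             if reveal_time[i] == 0:
--                 reveal_time[i] = t
--
--     # 3. "완전히 비스포인 단어" 미리 수집
--     outside_words = set()
--     for s, e, w in words:
--         all_outside = True
--         for i in range(s, e + 1):
--             if reveal_time[i] > 0:
--                 all_outside = False
--                 break
--         if all_outside:
--             outside_words.add(w)
--
--     # 4. 단어별 정보 계산
--     word_infos = []
--     for idx, (s, e, w) in enumerate(words):
--         is_spo_word = False
--         max_time = 0
--
--         for i in range(s, e + 1):
--             if reveal_time[i] > 0:
--                 is_spo_word = True
--             max_time = max(max_time, reveal_time[i])
--
--         word_infos.append((max_time, s, w, is_spo_word))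
--
--     # 5. 시간 + 위치 기준 정렬
--     word_infos.sort()
--
--     # 6. 처리
--     seen = set()
--     count = 0
--
--     for time, s, w, is_spo_word in word_infos:
--         if not is_spo_word:
--             continue
--         if w in outside_words:
--             continue
--         if w in seen:
--             continue
--
--         seen.add(w)
--         count += 1
--
--     return count
-- ===== SOURCE B (Python) =====
-- def solution(message, spoiler_ranges):
--     n = len(message)
--
--     # paint a boolean "revealed" mask (which spoiler revealed a cell first is irrelevant)
--     revealed = [False] * n
--     for s, e in spoiler_ranges:
--         for i in range(s, e + 1):
--             revealed[i] = True
--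
--     # one left-to-right scan: collect words with a revealed char / fully clean words
--     spoiled = set()
--     clean = set()
--     word = []
--     hit = False
--     i = 0
--     while i <= n:
--         if i < n and message[i] != ' ':
--             word.append(message[i])
--             hit = hit or revealed[i]
--         elif word:
--             w = ''.join(word)
--             if hit:
--                 spoiled.add(w)
--             else:
--                 clean.add(w)
--             word = []
--             hit = False
--         i += 1
--
--     # a word counts iff some occurrence is spoiled and no occurrence is fully clean
--     return len(spoiled - clean)
-- ===== Notes on version B (the rewrite author's own statement) =====
-- stated objective: simpler
-- what changed: B drops A's per-cell reveal *times*, word-info tuples and the sort entirely: it paints a boolean revealed mask, classifies words into spoiled/clean sets in one left-to-right scan, and returns len(spoiled - clean), which equals A's sorted-dedup count because the count only depends on which distinct words have a spoiled occurrence and no fully-clean occurrence.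
import Mathlib
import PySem

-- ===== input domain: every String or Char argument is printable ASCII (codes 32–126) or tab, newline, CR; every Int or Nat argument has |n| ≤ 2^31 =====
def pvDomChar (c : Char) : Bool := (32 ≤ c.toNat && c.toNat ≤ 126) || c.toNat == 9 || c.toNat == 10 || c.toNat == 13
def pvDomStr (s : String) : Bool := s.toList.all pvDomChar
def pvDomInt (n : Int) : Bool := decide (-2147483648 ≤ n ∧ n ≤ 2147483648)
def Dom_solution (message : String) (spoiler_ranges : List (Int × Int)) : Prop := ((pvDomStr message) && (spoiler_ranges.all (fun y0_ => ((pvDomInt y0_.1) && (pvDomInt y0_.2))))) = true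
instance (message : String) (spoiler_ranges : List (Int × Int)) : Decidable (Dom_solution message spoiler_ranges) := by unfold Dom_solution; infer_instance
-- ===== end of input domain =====

-- B replaces A's reveal-time bookkeeping, word-info tuples and sort by a boolean revealed
-- mask, one scan classifying words into spoiled/clean sets, and len(spoiled - clean) (simpler).

-- ===== PORT A =====
-- inner `while j < n and message[j] != ' '` of A's word parser
def findEnd (cs : List Char) (n j : Int) : Int :=
  if _h : j < n ∧ PySem.List.pyGetD cs j ' ' ≠ ' ' then findEnd cs n (j + 1) else j
termination_by (n - j).toNat
decreasing_by omega

-- termination facts for the outer parser loop (needed by `wordsLoopA`'s decreasing_by)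
theorem le_findEnd (cs : List Char) (n j : Int) : j ≤ findEnd cs n j := by
  unfold findEnd
  split
  · have := le_findEnd cs n (j + 1); omega
  · omega
termination_by (n - j).toNat
decreasing_by omega

theorem lt_findEnd (cs : List Char) (n j : Int) (h1 : j < n)
    (h2 : PySem.List.pyGetD cs j ' ' ≠ ' ') : j < findEnd cs n j := by
  rw [findEnd, dif_pos ⟨h1, h2⟩]
  have := le_findEnd cs n (j + 1); omega

-- A's step 1: the outer `while i < n` word parser (emits (start, end, word))
def wordsLoopA (cs : List Char) (n i : Int) : List (Int × Int × List Char) :=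
  if _h : i < n then
    if PySem.List.pyGetD cs i ' ' = ' ' then wordsLoopA cs n (i + 1)
    else (i, findEnd cs n i - 1, PySem.List.slice cs (some i) (some (findEnd cs n i))) ::
         wordsLoopA cs n (findEnd cs n i)
  else []
termination_by (n - i).toNat
decreasing_by
  · omega
  · have := lt_findEnd cs n i (by omega) (by assumption); omega

-- A's step 2: `for i in range(s, e+1): if reveal_time[i] == 0: reveal_time[i] = t`
def paintA (rt : List Int) (t : Int) (se : Int × Int) : List Int :=
  (PySem.List.pyRange se.1 (se.2 + 1) 1).foldl
    (fun rt i => if PySem.List.pyGetD rt i 0 = 0 then PySem.List.pySetD rt i t else rt) rt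

def revealA (n : Int) (ranges : List (Int × Int)) : List Int :=
  (ranges.foldl (fun st se => (paintA st.1 st.2 se, st.2 + 1)) (List.replicate n.toNat 0, (1 : Int))).1

-- A's step 3 inner loop (the `break` only short-circuits: once False it stays False)
def allOutside (rt : List Int) (s e : Int) : Bool :=
  (PySem.List.pyRange s (e + 1) 1).foldl
    (fun b i => if 0 < PySem.List.pyGetD rt i 0 then false else b) true

def outsideA (rt : List Int) (ws : List (Int × Int × List Char)) : PySem.Set (List Char) :=
  ws.foldl (fun acc x => if allOutside rt x.1 x.2.1 then PySem.Set.add acc x.2.2 else acc)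
    PySem.Set.empty

-- A's step 4 inner loop: (is_spo_word, max_time) in one pass (enumerate's idx is unused by A)
def wordInfo (rt : List Int) (s e : Int) : Bool × Int :=
  (PySem.List.pyRange s (e + 1) 1).foldl
    (fun p i => (if 0 < PySem.List.pyGetD rt i 0 then true else p.1,
                 max p.2 (PySem.List.pyGetD rt i 0))) (false, 0)

def infosA (rt : List Int) (ws : List (Int × Int × List Char)) :
    List (Int × Int × List Char × Bool) :=
  ws.foldl (fun acc x =>
    acc ++ [((wordInfo rt x.1 x.2.1).2, x.1, x.2.2, (wordInfo rt x.1 x.2.1).1)]) []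

-- A's step 6 loop over the sorted infos
def countA (outside : PySem.Set (List Char)) (infos : List (Int × Int × List Char × Bool)) : Int :=
  (infos.foldl (fun (p : PySem.Set (List Char) × Int) x =>
      if x.2.2.2 = false then p
      else if PySem.Set.contains outside x.2.2.1 then p
      else if PySem.Set.contains p.1 x.2.2.1 then p
      else (PySem.Set.add p.1 x.2.2.1, p.2 + 1)) (PySem.Set.empty, 0)).2

def solution (message : String) (spoiler_ranges : List (Int × Int)) : Int :=
  let cs := message.toList
  let n : Int := cs.length
  let ws := wordsLoopA cs n 0
  let rt := revealA n spoiler_ranges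
  -- step 5 `word_infos.sort()`: Python's tuple sort; start indices (2nd component) are
  -- distinct across entries, so sorting by (max_time, s) is exactly Python's sort here
  countA (outsideA rt ws) (PySem.List.sorted2 (infosA rt ws) (fun x => x.1) (fun x => x.2.1) false)

-- ===== PORT B =====
def revealB (n : Int) (ranges : List (Int × Int)) : List Bool :=
  ranges.foldl (fun rv se =>
      (PySem.List.pyRange se.1 (se.2 + 1) 1).foldl (fun rv i => PySem.List.pySetD rv i true) rv)
    (List.replicate n.toNat false)

-- B's single `while i <= n` scan (word joined on flush; kept as List Char here)
def scanB (cs : List Char) (rv : List Bool) (n i : Int)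
    (spo cln : PySem.Set (List Char)) (word : List Char) (hit : Bool) :
    PySem.Set (List Char) × PySem.Set (List Char) :=
  if _h : i ≤ n then
    if i < n ∧ PySem.List.pyGetD cs i ' ' ≠ ' ' then
      scanB cs rv n (i + 1) spo cln (word ++ [PySem.List.pyGetD cs i ' '])
        (hit || PySem.List.pyGetD rv i false)
    else if word ≠ [] then
      scanB cs rv n (i + 1) (if hit then PySem.Set.add spo word else spo)
        (if hit then cln else PySem.Set.add cln word) [] false
    else scanB cs rv n (i + 1) spo cln word hit
  else (spo, cln)
termination_by (n + 1 - i).toNat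
decreasing_by all_goals omega

def solution_alt (message : String) (spoiler_ranges : List (Int × Int)) : Int :=
  let cs := message.toList
  let n : Int := cs.length
  let rv := revealB n spoiler_ranges
  let p := scanB cs rv n 0 PySem.Set.empty PySem.Set.empty [] false
  ((PySem.Set.diff p.1 p.2).length : Int)

-- ===== PRECONDITION & SPEC =====
-- Pre_ excludes exactly the inputs where A raises IndexError: a nonempty spoiler range
-- reaching an index outside [-len(message), len(message)).
def Pre_solution (message : String) (spoiler_ranges : List (Int × Int)) : Prop :=
  ∀ p ∈ spoiler_ranges, p.1 ≤ p.2 →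
    (-(message.toList.length : Int) ≤ p.1 ∧ p.2 < (message.toList.length : Int))
instance (message : String) (spoiler_ranges : List (Int × Int)) :
    Decidable (Pre_solution message spoiler_ranges) := by unfold Pre_solution; infer_instance

def pvWitness_solution : String × (List (Int × Int)) := ("ab cd ab", [(0, 1)])

def Spec_solution (message : String) (spoiler_ranges : List (Int × Int)) (out : Int) : Prop :=
  out = solution_alt message spoiler_ranges
instance (message : String) (spoiler_ranges : List (Int × Int)) (out : Int) :
    Decidable (Spec_solution message spoiler_ranges out) := by unfold Spec_solution; infer_instance

-- ===== CLAIM (what is proved, stated in full; the proofs are below) =====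
def Claim_equal_solution : Prop := ∀ (message : String) (spoiler_ranges : List (Int × Int)), Dom_solution message spoiler_ranges → Pre_solution message spoiler_ranges → Spec_solution message spoiler_ranges (solution message spoiler_ranges)

-- ===== LEMMAS AND PROOFS =====

-- `anyTo rv a b` = "some cell in [a, b) is revealed" — the common per-word predicate
def anyTo (rv : List Bool) (a b : Int) : Bool :=
  (PySem.List.pyRange a b 1).any (fun i => PySem.List.pyGetD rv i false)

-- classification of A's word list by that predicate (what B's scan amounts to)
def classify (rv : List Bool) (ws : List (Int × Int × List Char))
    (p : PySem.Set (List Char) × PySem.Set (List Char)) :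
    PySem.Set (List Char) × PySem.Set (List Char) :=
  ws.foldl (fun p x =>
    if anyTo rv x.1 (x.2.1 + 1) then (PySem.Set.add p.1 x.2.2, p.2)
    else (p.1, PySem.Set.add p.2 x.2.2)) p


theorem pySetD_map' {α β : Type} (f : α → β) (xs : List α) (i : Int) (v : α) :
    PySem.List.pySetD (xs.map f) i (f v) = (PySem.List.pySetD xs i v).map f := by
  simp only [PySem.List.pySetD, PySem.List.pySet?, List.length_map]
  cases PySem.List.pyIdx? xs.length i <;> simp [List.map_set]

theorem set_self' {α : Type} (l : List α) (k : Nat) (v : α) (h : l[k]? = some v) :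
    l.set k v = l := by
  apply List.ext_getElem (by simp)
  intro i h1 h2
  rw [List.getElem_set]
  split
  · next heq => subst heq; simpa [List.getElem?_eq_getElem h2] using h.symm
  · rfl

-- pyIdx? yields an in-range index
theorem pyIdx?_lt {n : Nat} {i : Int} {k : Nat} (h : PySem.List.pyIdx? n i = some k) : k < n := by
  unfold PySem.List.pyIdx? at h
  split_ifs at h <;> simp_all <;> omega

theorem paintA_step_map (rt : List Int) (t i : Int) (ht : 1 ≤ t) (hnn : ∀ x ∈ rt, 0 ≤ x) :
    PySem.List.pySetD (rt.map (fun x => decide (0 < x))) i true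
      = (if PySem.List.pyGetD rt i 0 = 0 then PySem.List.pySetD rt i t else rt).map
          (fun x => decide (0 < x)) := by
  split
  · next hc =>
    have : (true : Bool) = (fun x => decide (0 < x)) t := by simp; omega
    rw [this, pySetD_map']
  · next hc =>
    -- cell is already nonzero hence positive hence `true`; setting it to true is a no-op
    simp only [PySem.List.pySetD, PySem.List.pySet?, PySem.List.pyGetD, PySem.List.pyGet?] at *
    rcases hk : PySem.List.pyIdx? rt.length i with _ | k
    · simp [List.length_map, hk]
    · have hklt : k < rt.length := pyIdx?_lt hk
      rw [hk] at hc
      simp only [List.length_map, hk, Option.map_some, Option.getD_some]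
      have hval : rt[k] ≠ 0 := by
        simpa [List.getElem?_eq_getElem hklt] using hc
      have hpos : 0 < rt[k] := by
        have := hnn rt[k] (List.getElem_mem hklt); omega
      apply set_self'
      simp [hklt, hpos]

theorem paintA_step_nonneg (rt : List Int) (t i : Int) (ht : 1 ≤ t) (hnn : ∀ x ∈ rt, 0 ≤ x) :
    ∀ x ∈ (if PySem.List.pyGetD rt i 0 = 0 then PySem.List.pySetD rt i t else rt), 0 ≤ x := by
  split
  · intro x hx
    simp only [PySem.List.pySetD, PySem.List.pySet?] at hx
    rcases hk : PySem.List.pyIdx? rt.length i with _ | k <;> rw [hk] at hx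
    · simp at hx; exact hnn x hx
    · simp only [Option.map_some, Option.getD_some] at hx
      rcases List.mem_or_eq_of_mem_set hx with h | h
      · exact hnn x h
      · omega
  · exact hnn

theorem paint_fold_map (l : List Int) (rt : List Int) (t : Int) (ht : 1 ≤ t)
    (hnn : ∀ x ∈ rt, 0 ≤ x) :
    l.foldl (fun rv i => PySem.List.pySetD rv i true) (rt.map (fun x => decide (0 < x)))
      = (l.foldl (fun rt i => if PySem.List.pyGetD rt i 0 = 0 then PySem.List.pySetD rt i t
          else rt) rt).map (fun x => decide (0 < x))
    ∧ ∀ x ∈ l.foldl (fun rt i => if PySem.List.pyGetD rt i 0 = 0 then PySem.List.pySetD rt i t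
          else rt) rt, 0 ≤ x := by
  induction l generalizing rt with
  | nil => exact ⟨rfl, hnn⟩
  | cons i l ih =>
    simp only [List.foldl_cons]
    rw [paintA_step_map rt t i ht hnn]
    exact ih _ (paintA_step_nonneg rt t i ht hnn)

theorem reveal_fold (ranges : List (Int × Int)) (rt : List Int) (t : Int) (ht : 1 ≤ t)
    (hnn : ∀ x ∈ rt, 0 ≤ x) :
    ranges.foldl (fun rv se =>
        (PySem.List.pyRange se.1 (se.2 + 1) 1).foldl (fun rv i => PySem.List.pySetD rv i true) rv)
      (rt.map (fun x => decide (0 < x)))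
      = ((ranges.foldl (fun st se => (paintA st.1 st.2 se, st.2 + 1)) (rt, t)).1).map
          (fun x => decide (0 < x)) := by
  induction ranges generalizing rt t with
  | nil => rfl
  | cons se rest ih =>
    simp only [List.foldl_cons]
    obtain ⟨h1, h2⟩ := paint_fold_map (PySem.List.pyRange se.1 (se.2 + 1) 1) rt t ht hnn
    rw [h1]
    exact ih (paintA rt t se) (t + 1) (by omega) h2

theorem reveal_eq (n : Int) (ranges : List (Int × Int)) :
    revealB n ranges = (revealA n ranges).map (fun t => decide (0 < t)) := by
  unfold revealB revealA
  have : (List.replicate n.toNat false)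
      = (List.replicate n.toNat (0 : Int)).map (fun x => decide (0 < x)) := by
    simp
  rw [this]
  exact reveal_fold ranges _ 1 (by omega) (by simp)

theorem findEnd_le (cs : List Char) (n j : Int) (h : j ≤ n) : findEnd cs n j ≤ n := by
  unfold findEnd
  split
  · exact findEnd_le cs n (j + 1) (by omega)
  · omega
termination_by (n - j).toNat
decreasing_by omega

theorem findEnd_run (cs : List Char) (n j : Int) : ∀ k, j ≤ k → k < findEnd cs n j →
    k < n ∧ PySem.List.pyGetD cs k ' ' ≠ ' ' := by
  intro k hjk hk
  rw [findEnd] at hk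
  split at hk
  · next hg =>
    by_cases hkj : k = j
    · subst hkj; exact hg
    · exact findEnd_run cs n (j + 1) k (by omega) hk
  · omega
termination_by (n - j).toNat
decreasing_by omega

theorem findEnd_stop (cs : List Char) (n j : Int) :
    ¬ (findEnd cs n j < n ∧ PySem.List.pyGetD cs (findEnd cs n j) ' ' ≠ ' ') := by
  rw [findEnd]
  split
  · exact findEnd_stop cs n (j + 1)
  · assumption
termination_by (n - j).toNat
decreasing_by omega

theorem slice_snoc (cs : List Char) (i k : Int) (h0 : 0 ≤ i) (hik : i ≤ k)
    (hk : k < (cs.length : Int)) :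
    PySem.List.slice cs (some i) (some k) ++ [PySem.List.pyGetD cs k ' ']
      = PySem.List.slice cs (some i) (some (k + 1)) := by
  have h0k : 0 ≤ k := le_trans h0 hik
  rw [PySem.List.slice_toNat cs h0 h0k, PySem.List.slice_toNat cs h0 (by omega : (0:Int) ≤ k + 1),
    PySem.List.pyGetD_eq_getElem cs ' ' h0k hk]
  have hm : (k + 1).toNat - i.toNat = (k.toNat - i.toNat) + 1 := by omega
  rw [hm, List.take_add_one]
  have hlen : k.toNat - i.toNat < (cs.drop i.toNat).length := by
    simp [List.length_drop]; omega
  congr 1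
  rw [List.getElem?_eq_getElem hlen]
  simp only [List.getElem_drop, Option.toList_some]
  congr 2
  omega

theorem anyTo_snoc (rv : List Bool) (i k : Int) (hik : i ≤ k) :
    anyTo rv i (k + 1) = (anyTo rv i k || PySem.List.pyGetD rv k false) := by
  unfold anyTo
  rw [PySem.List.pyRange_one_succ_right hik]
  simp

theorem scan_run (cs : List Char) (rv : List Bool) (n i k : Int) (hn : n = (cs.length : Int))
    (h0 : 0 ≤ i) (hik : i ≤ k) (hkJ : k ≤ findEnd cs n i)
    (spo cln : PySem.Set (List Char)) :
    scanB cs rv n k spo cln (PySem.List.slice cs (some i) (some k)) (anyTo rv i k)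
      = scanB cs rv n (findEnd cs n i) spo cln
          (PySem.List.slice cs (some i) (some (findEnd cs n i))) (anyTo rv i (findEnd cs n i)) := by
  by_cases hlt : k < findEnd cs n i
  · obtain ⟨hkn, hkc⟩ := findEnd_run cs n i k hik hlt
    rw [scanB, dif_pos (by omega), if_pos ⟨hkn, hkc⟩,
      slice_snoc cs i k h0 hik (by omega), ← anyTo_snoc rv i k hik]
    exact scan_run cs rv n i (k + 1) hn h0 (by omega) (by omega) spo cln
  · have : k = findEnd cs n i := by omega
    rw [this]
termination_by (findEnd cs n i - k).toNat
decreasing_by omega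

theorem scan_eq (cs : List Char) (rv : List Bool) (n i : Int)
    (hn : n = (cs.length : Int)) (h0 : 0 ≤ i) (hi : i ≤ n)
    (spo cln : PySem.Set (List Char)) :
    scanB cs rv n i spo cln [] false = classify rv (wordsLoopA cs n i) (spo, cln) := by
  rw [wordsLoopA]
  by_cases hlt : i < n
  · rw [dif_pos hlt]
    by_cases hsp : PySem.List.pyGetD cs i ' ' = ' '
    · rw [if_pos hsp, scanB, dif_pos hi, if_neg (by simp [hsp]), if_neg (by simp)]
      exact scan_eq cs rv n (i + 1) hn (by omega) (by omega) spo cln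
    · rw [if_neg hsp]
      have hiJ : i < findEnd cs n i := lt_findEnd cs n i hlt hsp
      have hJn : findEnd cs n i ≤ n := findEnd_le cs n i (by omega)
      have hsl : PySem.List.slice cs (some i) (some i) = ([] : List Char) := by
        rw [PySem.List.slice_toNat cs h0 h0]; simp
      have hany : anyTo rv i i = false := by
        simp [anyTo, PySem.List.pyRange_one_eq_nil (le_refl i)]
      have h1 : scanB cs rv n i spo cln [] false
          = scanB cs rv n (findEnd cs n i) spo cln
              (PySem.List.slice cs (some i) (some (findEnd cs n i)))
              (anyTo rv i (findEnd cs n i)) := by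
        rw [← hsl, ← hany]
        exact scan_run cs rv n i i hn h0 le_rfl (by omega) spo cln
      rw [h1, scanB, dif_pos hJn, if_neg (findEnd_stop cs n i)]
      have hwne : PySem.List.slice cs (some i) (some (findEnd cs n i)) ≠ [] := by
        rw [PySem.List.slice_toNat cs h0 (by omega)]
        simp only [ne_eq, ← List.length_pos_iff, List.length_take, List.length_drop]
        omega
      rw [if_pos hwne]
      simp only [classify, List.foldl_cons]
      have hJ1 : findEnd cs n i - 1 + 1 = findEnd cs n i := by omega
      rw [hJ1]
      by_cases hJn' : findEnd cs n i < n
      · have hspJ : PySem.List.pyGetD cs (findEnd cs n i) ' ' = ' ' := by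
          by_contra hc; exact findEnd_stop cs n i ⟨hJn', hc⟩
        conv_rhs => rw [wordsLoopA]
        rw [dif_pos hJn', if_pos hspJ]
        have := scan_eq cs rv n (findEnd cs n i + 1) hn (by omega) (by omega)
        by_cases hA : anyTo rv i (findEnd cs n i) = true
        · simp only [hA, if_pos]
          exact this _ _
        · simp only [Bool.not_eq_true] at hA
          simp only [hA, Bool.false_eq_true, if_false]
          exact this _ _
      · have hJeq : findEnd cs n i = n := by omega
        conv_rhs => rw [wordsLoopA]
        rw [dif_neg (by omega), scanB, dif_neg (by omega)]
        by_cases hA : anyTo rv i (findEnd cs n i) = true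
        · simp [hA]
        · simp only [Bool.not_eq_true] at hA
          simp [hA]
  · rw [dif_neg hlt, scanB, dif_pos hi, if_neg (by omega), if_neg (by simp),
      scanB, dif_neg (by omega)]
    simp [classify]
termination_by (n - i).toNat
decreasing_by all_goals omega

theorem toFinset_add (s : PySem.Set (List Char)) (x : List Char) :
    (PySem.Set.add s x).toFinset = insert x s.toFinset := by
  rw [PySem.Set.add_eq_ite]; split
  · next h => rw [Finset.insert_eq_self.2 (List.mem_toFinset.2 h)]
  · simp [List.toFinset_append]

theorem getD_pos_eq (rt : List Int) (i : Int) :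
    decide (0 < PySem.List.pyGetD rt i 0)
      = PySem.List.pyGetD (rt.map (fun x => decide (0 < x))) i false := by
  have h := PySem.List.pyGetD_map (fun x => decide (0 < x)) rt i 0
  simpa using h.symm

theorem wordInfo_fst (rt : List Int) (s e : Int) :
    (wordInfo rt s e).1 = anyTo (rt.map (fun x => decide (0 < x))) s (e + 1) := by
  unfold wordInfo anyTo
  have hstep : (fun (p : Bool × Int) (i : Int) =>
      ((if 0 < PySem.List.pyGetD rt i 0 then true else p.1 : Bool),
        max p.2 (PySem.List.pyGetD rt i 0)))
      = (fun p i => ((fun b i => if (fun i => decide (0 < PySem.List.pyGetD rt i 0)) i = true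
            then true else b) p.1 i,
          (fun m i => max m (PySem.List.pyGetD rt i 0)) p.2 i)) := by
    funext p i; by_cases h : 0 < PySem.List.pyGetD rt i 0 <;> simp [h]
  rw [hstep, PySem.List.foldl_prod_mk
      (f := fun b i => if (fun i => decide (0 < PySem.List.pyGetD rt i 0)) i = true then true else b)
      (g := fun m i => max m (PySem.List.pyGetD rt i 0)),
    PySem.List.foldl_if_true_eq]
  simp only [Bool.false_or]
  simp only [getD_pos_eq]

theorem infosA_eq (rt : List Int) (ws : List (Int × Int × List Char)) :
    infosA rt ws = ws.map (fun x => ((wordInfo rt x.1 x.2.1).2, x.1, x.2.2,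
      anyTo (rt.map (fun x => decide (0 < x))) x.1 (x.2.1 + 1))) := by
  unfold infosA
  rw [PySem.List.foldl_append_singleton_eq_map]
  simp only [List.nil_append]
  exact List.map_congr_left (fun x _ => by rw [wordInfo_fst])

theorem allOutside_eq (rt : List Int) (s e : Int) :
    allOutside rt s e = !(anyTo (rt.map (fun x => decide (0 < x))) s (e + 1)) := by
  unfold allOutside anyTo
  have hstep : (fun (b : Bool) (i : Int) => (if 0 < PySem.List.pyGetD rt i 0 then false else b : Bool))
      = (fun b i => if (fun i => decide (0 < PySem.List.pyGetD rt i 0)) i = true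
          then false else b) := by
    funext b i; by_cases h : 0 < PySem.List.pyGetD rt i 0 <;> simp [h]
  rw [hstep, PySem.List.foldl_if_false_eq]
  simp only [Bool.true_and]
  simp only [getD_pos_eq]

theorem outsideA_eq (rt : List Int) (ws : List (Int × Int × List Char)) :
    outsideA rt ws = PySem.Set.ofList
      ((ws.filter (fun x => !anyTo (rt.map (fun x => decide (0 < x))) x.1 (x.2.1 + 1))).map
        (fun x => x.2.2)) := by
  unfold outsideA
  rw [PySem.List.foldl_ite_eq_foldl_filter (p := fun x => allOutside rt x.1 x.2.1 = true)
    (f := fun acc (x : Int × Int × List Char) => PySem.Set.add acc x.2.2),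
    ← PySem.Set.update_map_eq_foldl_add]
  show PySem.Set.update [] _ = _
  rw [PySem.Set.update_nil_left]
  congr 1
  apply congrArg
  apply List.filter_congr
  intro x _
  simp [allOutside_eq]

theorem classify_eq (rv : List Bool) (ws : List (Int × Int × List Char)) :
    classify rv ws (PySem.Set.empty, PySem.Set.empty)
      = (PySem.Set.ofList ((ws.filter (fun x => anyTo rv x.1 (x.2.1 + 1))).map (fun x => x.2.2)),
         PySem.Set.ofList ((ws.filter (fun x => !anyTo rv x.1 (x.2.1 + 1))).map (fun x => x.2.2))) := by
  unfold classify
  have hstep : (fun (p : PySem.Set (List Char) × PySem.Set (List Char)) (x : Int × Int × List Char) =>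
      if anyTo rv x.1 (x.2.1 + 1) then (PySem.Set.add p.1 x.2.2, p.2)
      else (p.1, PySem.Set.add p.2 x.2.2))
      = (fun p x => ((fun s (x : Int × Int × List Char) =>
            if anyTo rv x.1 (x.2.1 + 1) = true then PySem.Set.add s x.2.2 else s) p.1 x,
          (fun s (x : Int × Int × List Char) =>
            if (!anyTo rv x.1 (x.2.1 + 1)) = true then PySem.Set.add s x.2.2 else s) p.2 x)) := by
    funext p x; by_cases h : anyTo rv x.1 (x.2.1 + 1) = true <;> simp [h]
  rw [hstep, PySem.List.foldl_prod_mk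
      (f := fun s (x : Int × Int × List Char) =>
        if anyTo rv x.1 (x.2.1 + 1) = true then PySem.Set.add s x.2.2 else s)
      (g := fun s (x : Int × Int × List Char) =>
        if (!anyTo rv x.1 (x.2.1 + 1)) = true then PySem.Set.add s x.2.2 else s)]
  have comp1 : ∀ (q : (Int × Int × List Char) → Bool),
      ws.foldl (fun s x => if q x = true then PySem.Set.add s x.2.2 else s) PySem.Set.empty
        = PySem.Set.ofList ((ws.filter q).map (fun x => x.2.2)) := by
    intro q
    rw [PySem.List.foldl_ite_eq_foldl_filter (p := fun x => q x = true)
      (f := fun s (x : Int × Int × List Char) => PySem.Set.add s x.2.2),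
      ← PySem.Set.update_map_eq_foldl_add]
    show PySem.Set.update [] _ = _
    rw [PySem.Set.update_nil_left]
    congr 2
    apply List.filter_congr
    intro x _; simp
  rw [comp1 (fun x => anyTo rv x.1 (x.2.1 + 1)), comp1 (fun x => !anyTo rv x.1 (x.2.1 + 1))]

theorem countA_card (outside : PySem.Set (List Char))
    (l : List (Int × Int × List Char × Bool)) (seen : PySem.Set (List Char)) (c : Int) :
    (l.foldl (fun (p : PySem.Set (List Char) × Int) x =>
        if x.2.2.2 = false then p
        else if PySem.Set.contains outside x.2.2.1 then p
        else if PySem.Set.contains p.1 x.2.2.1 then p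
        else (PySem.Set.add p.1 x.2.2.1, p.2 + 1)) (seen, c)).2
      = c + ((((l.filter (fun x => x.2.2.2 && !(PySem.Set.contains outside x.2.2.1))).map
          (fun x => x.2.2.1)).toFinset \ seen.toFinset).card : Int) := by
  induction l generalizing seen c with
  | nil => simp
  | cons x l ih =>
    simp only [List.foldl_cons]
    by_cases hspo : x.2.2.2 = false
    · rw [if_pos hspo, ih]
      rw [List.filter_cons_of_neg (by rw [hspo]; simp)]
    · rw [if_neg hspo]
      have hspo' : x.2.2.2 = true := by revert hspo; cases x.2.2.2 <;> simp
      by_cases hout : PySem.Set.contains outside x.2.2.1 = true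
      · rw [if_pos hout, ih]
        rw [List.filter_cons_of_neg (by rw [hspo', hout]; simp)]
      · rw [if_neg hout]
        have hout' : PySem.Set.contains outside x.2.2.1 = false := by
          revert hout; cases PySem.Set.contains outside x.2.2.1 <;> simp
        rw [List.filter_cons_of_pos (by rw [hspo', hout']; rfl)]
        by_cases hseen : PySem.Set.contains seen x.2.2.1 = true
        · rw [if_pos hseen, ih]
          have hw : x.2.2.1 ∈ seen.toFinset :=
            List.mem_toFinset.2 ((PySem.Set.contains_iff seen x.2.2.1).1 hseen)
          simp only [List.map_cons, List.toFinset_cons]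
          rw [Finset.insert_sdiff_of_mem _ hw]
        · rw [if_neg hseen, ih]
          have hw : x.2.2.1 ∉ seen.toFinset := by
            intro hmem
            exact hseen ((PySem.Set.contains_iff seen x.2.2.1).2 (List.mem_toFinset.1 hmem))
          have hts : (PySem.Set.add seen x.2.2.1).toFinset = insert x.2.2.1 seen.toFinset :=
            toFinset_add seen x.2.2.1
          rw [hts]
          set A := (l.filter (fun x => x.2.2.2 && !(PySem.Set.contains outside x.2.2.1))).map
            (fun x => x.2.2.1) |>.toFinset with hA
          have key : insert x.2.2.1 A \ seen.toFinset
              = insert x.2.2.1 (A \ insert x.2.2.1 seen.toFinset) := by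
            ext y
            simp only [Finset.mem_sdiff, Finset.mem_insert]
            constructor
            · rintro ⟨hy | hy, hys⟩
              · exact Or.inl hy
              · by_cases hyx : y = x.2.2.1
                · exact Or.inl hyx
                · exact Or.inr ⟨hy, by simp [hyx, hys]⟩
            · rintro (hy | ⟨hy, hys⟩)
              · exact ⟨Or.inl hy, hy ▸ hw⟩
              · refine ⟨Or.inr hy, ?_⟩
                intro hc
                exact hys (by simp [hc])
          have hcard : (insert x.2.2.1 A \ seen.toFinset).card
              = (A \ insert x.2.2.1 seen.toFinset).card + 1 := by
            rw [key, Finset.card_insert_of_notMem (by simp)]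
          simp only [List.toFinset_cons, List.map_cons] at *
          rw [hcard]
          push_cast
          ring

-- ===== VERDICT (by name: the statement is the Claim_ definition above) =====
theorem solution_spec : Claim_equal_solution := by
  intro message ranges _dom _pre
  unfold Spec_solution solution solution_alt
  dsimp only
  set cs := message.toList with hcs
  set n : Int := (cs.length : Int) with hnn
  set rt := revealA n ranges with hrt
  set rv := rt.map (fun x => decide (0 < x)) with hrv
  set ws := wordsLoopA cs n 0 with hws
  set L1 := (ws.filter (fun x => anyTo rv x.1 (x.2.1 + 1))).map (fun x => x.2.2) with hL1
  set L2 := (ws.filter (fun x => !anyTo rv x.1 (x.2.1 + 1))).map (fun x => x.2.2) with hL2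
  -- B side
  rw [reveal_eq n ranges, ← hrv,
    scan_eq cs rv n 0 hnn le_rfl (by positivity) PySem.Set.empty PySem.Set.empty,
    ← hws, classify_eq rv ws, ← hL1, ← hL2]
  -- A side
  rw [infosA_eq, outsideA_eq, ← hrv, ← hL2]
  unfold countA
  rw [countA_card]
  -- permutation invariance of the distinct passing words
  have hperm := PySem.List.sorted2_perm
    (ws.map (fun x => ((wordInfo rt x.1 x.2.1).2, x.1, x.2.2, anyTo rv x.1 (x.2.1 + 1))))
    (fun x => x.1) (fun x => x.2.1) false
  set q : (Int × Int × List Char × Bool) → Bool :=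
    fun x => x.2.2.2 && !(PySem.Set.contains (PySem.Set.ofList L2) x.2.2.1) with hq
  have hfin := List.toFinset_eq_of_perm _ _ (((hperm.filter q).map (fun x => x.2.2.1)))
  rw [hfin]
  -- push the filter through the map
  rw [List.filter_map, List.map_map]
  have hnd : (PySem.Set.diff (PySem.Set.ofList L1) (PySem.Set.ofList L2)).Nodup :=
    PySem.Set.nodup_diff _ _ (PySem.Set.nodup_ofList L1)
  rw [← List.toFinset_card_of_nodup hnd]
  simp only [show (PySem.Set.empty : PySem.Set (List Char)) = [] from rfl,
    List.toFinset_nil, Finset.sdiff_empty]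
  norm_cast
  rw [Nat.zero_add]
  congr 1
  apply Finset.ext
  intro y
  simp only [List.mem_toFinset, List.mem_map, List.mem_filter, Function.comp,
    PySem.Set.mem_diff, hq, Bool.and_eq_true, Bool.not_eq_true',
    PySem.Set.contains_eq_listContains, PySem.Set.mem_ofList, hL1, hL2]
  constructor
  · rintro ⟨x, ⟨hx, ha, hc⟩, rfl⟩
    exact ⟨⟨x, ⟨hx, ha⟩, rfl⟩, by simpa using hc⟩
  · rintro ⟨⟨x, ⟨hx, ha⟩, rfl⟩, hc⟩
    exact ⟨x, ⟨hx, ha, by simpa using hc⟩, rfl⟩
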